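-- pv_equiv track=rewrite | github.com/DominikWojtanowski/Matura-informatyka | 2012 - Maj/Zadanie 5/zadanie_5.py | stworzTablicePascala
-- ===== SOURCE A (Python) =====
-- from typing import Tuple, List
--
-- def stworzTablicePascala(tab: List[int], wysokosc: int) -> List[List[int]]:
--     tabLen = tab.__len__()
--
--     newTab = []
--
--     poczatek = 0
--     koniec = 0
--
--     for i in range(1, wysokosc + 1):
--         przedzial = tab[poczatek: koniec + i]
--         koniec += i
--         poczatek += i
--         newTab.append(przedzial)
--
--
--     przedzialGoraPoczatek = 2
--     przedzialLewyPoczatek = 1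
--
--     for (idx,i) in enumerate(range(przedzialGoraPoczatek, wysokosc), start=1):
--         for j in range(przedzialLewyPoczatek, i):
--             newTab[i][j] = newTab[i-1][j-1] + newTab[i-1][j]
--
--     return newTab
-- ===== SOURCE B (Python) =====
-- from typing import List
--
-- def stworzTablicePascala(tab: List[int], wysokosc: int) -> List[List[int]]:
--     # Each row is computed purely from the previous one by zipping adjacent
--     # pairs; for filled rows only the two edge cells are read from tab, at
--     # closed-form triangular offsets (no running offsets, no mutation).
--     newTab = []
--     for i in range(wysokosc):
--         lo = i * (i + 1) // 2
--         if i < 2: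
--             row = tab[lo:lo + i + 1]
--         else:
--             prev = newTab[-1]
--             row = tab[lo:lo + 1] + [a + b for a, b in zip(prev, prev[1:])] + tab[lo + i:lo + i + 1]
--         newTab.append(row)
--     return newTab
-- ===== Notes on version B (the rewrite author's own statement) =====
-- stated objective: alternative
-- what changed: A slices every row out of tab with running offsets and then mutates interior cells in place by random-access indexed assignment into the finished table; B never mutates anything: each filled row is built as a fresh list by concatenating the left edge, a zip of adjacent pairs of the previous row, and the right edge, with the two edge cells read from tab at closed-form triangular offsets i*(i+1)//2 instead of accumulated ones.
import Mathlib
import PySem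

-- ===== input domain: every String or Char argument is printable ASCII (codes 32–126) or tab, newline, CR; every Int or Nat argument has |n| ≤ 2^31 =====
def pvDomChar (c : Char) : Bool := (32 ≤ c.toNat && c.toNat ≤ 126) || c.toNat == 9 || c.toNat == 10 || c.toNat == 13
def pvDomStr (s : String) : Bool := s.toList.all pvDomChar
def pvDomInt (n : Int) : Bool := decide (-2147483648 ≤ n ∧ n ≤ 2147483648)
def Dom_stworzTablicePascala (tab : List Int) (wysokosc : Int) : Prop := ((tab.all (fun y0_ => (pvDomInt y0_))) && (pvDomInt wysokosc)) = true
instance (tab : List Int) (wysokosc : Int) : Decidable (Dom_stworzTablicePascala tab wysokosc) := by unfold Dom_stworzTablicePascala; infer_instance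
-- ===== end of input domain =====

-- B replaces A's slice-then-mutate passes by a mutation-free build: each filled row is a fresh
-- concatenation (left edge ++ zip of adjacent pairs of the previous row ++ right edge), with the
-- edges read at closed-form triangular offsets; equal to A on Pre_ (where A does not raise).

-- ===== PORT A =====
def stworzTablicePascala (tab : List Int) (wysokosc : Int) : List (List Int) :=
  -- first loop: slice out rows of lengths 1,2,… tracking (newTab, poczatek, koniec)
  let st := (PySem.List.pyRange 1 (wysokosc + 1) 1).foldl
    (fun (st : List (List Int) × Int × Int) i =>
      let przedzial := PySem.List.slice tab (some st.2.1) (some (st.2.2 + i))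
      (st.1 ++ [przedzial], st.2.1 + i, st.2.2 + i)) ([], 0, 0)
  let newTab := st.1
  -- second loop: newTab[i][j] = newTab[i-1][j-1] + newTab[i-1][j]
  -- (indexing total via pyGetD/pySetD defaults; Pre_ excludes the IndexError inputs)
  (PySem.List.pyRange 2 wysokosc 1).foldl
    (fun nt i =>
      (PySem.List.pyRange 1 i 1).foldl
        (fun nt j =>
          PySem.List.pySetD nt i
            (PySem.List.pySetD (PySem.List.pyGetD nt i [])
              j
              (PySem.List.pyGetD (PySem.List.pyGetD nt (i-1) []) (j-1) 0 +
               PySem.List.pyGetD (PySem.List.pyGetD nt (i-1) []) j 0)))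
        nt)
    newTab

-- ===== PORT B =====
def stworzTablicePascala_alt (tab : List Int) (wysokosc : Int) : List (List Int) :=
  (PySem.List.pyRange 0 wysokosc 1).foldl
    (fun (newTab : List (List Int)) i =>
      let lo := PySem.Int.floordiv (i * (i + 1)) 2
      let row :=
        if i < 2 then
          PySem.List.slice tab (some lo) (some (lo + i + 1))
        else
          let prev := PySem.List.pyGetD newTab (-1) []
          PySem.List.slice tab (some lo) (some (lo + 1)) ++
            List.zipWith (· + ·) prev (PySem.List.slice prev (some 1) none) ++
            PySem.List.slice tab (some (lo + i)) (some (lo + i + 1))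
      newTab ++ [row]) []

-- ===== PRECONDITION & SPEC =====
-- Pre_ excludes exactly the inputs where Python A raises IndexError in its second
-- loop (tab too short for the triangle it indexes into).
def Pre_stworzTablicePascala (tab : List Int) (wysokosc : Int) : Prop :=
  wysokosc ≤ 2 ∨ 2 * (tab.length : Int) ≥ (wysokosc - 1) * (wysokosc + 2)
instance (tab : List Int) (wysokosc : Int) : Decidable (Pre_stworzTablicePascala tab wysokosc) := by unfold Pre_stworzTablicePascala; infer_instance

def pvWitness_stworzTablicePascala : List Int × Int := ([1, 2, 3, 4, 5, 6], 3)

def Spec_stworzTablicePascala (tab : List Int) (wysokosc : Int) (out : List (List Int)) : Prop := out = stworzTablicePascala_alt tab wysokosc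
instance (tab : List Int) (wysokosc : Int) (out : List (List Int)) : Decidable (Spec_stworzTablicePascala tab wysokosc out) := by unfold Spec_stworzTablicePascala; infer_instance

-- ===== CLAIM (what is proved, stated in full; the proofs are below) =====
def Claim_equal_stworzTablicePascala : Prop := ∀ (tab : List Int) (wysokosc : Int), Dom_stworzTablicePascala tab wysokosc → Pre_stworzTablicePascala tab wysokosc → Spec_stworzTablicePascala tab wysokosc (stworzTablicePascala tab wysokosc)

-- ===== LEMMAS AND PROOFS =====

-- triangular offsets: start index of row m
def pvTri : Nat → Int
  | 0 => 0
  | m + 1 => pvTri m + (m + 1)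

def pvTriN : Nat → Nat
  | 0 => 0
  | m + 1 => pvTriN m + (m + 1)

-- rows produced by A's first loop after m iterations
def pvRowsA (tab : List Int) : Nat → List (List Int)
  | 0 => []
  | m + 1 => pvRowsA tab m ++ [PySem.List.slice tab (some (pvTri m)) (some (pvTri m + (m + 1)))]

-- fill row interior from `prev`, for j in range(a, i)
def pvFillFrom (prev row : List Int) (a i : Int) : List Int :=
  (PySem.List.pyRange a i 1).foldl
    (fun row j =>
      PySem.List.pySetD row j
        (PySem.List.pyGetD prev (j-1) 0 + PySem.List.pyGetD prev j 0)) row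

-- A's outer-loop body, expressed as a single table update
def pvUpd (nt : List (List Int)) (i : Int) : List (List Int) :=
  PySem.List.pySetD nt i
    (pvFillFrom (PySem.List.pyGetD nt (i-1) []) (PySem.List.pyGetD nt i []) 1 i)

-- the finished table after m rows (common reference shape)
def pvFinal (tab : List Int) : Nat → List (List Int)
  | 0 => []
  | m + 1 =>
    pvFinal tab m ++
      [pvFillFrom (PySem.List.pyGetD (pvFinal tab m) ((m : Int) - 1) [])
        (PySem.List.slice tab (some (pvTri m)) (some (pvTri m + (m + 1)))) 1 m]

lemma pvGetD_pySetD_ne (nt : List (List Int)) (i k : Int) (r : List Int)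
    (hi : 0 ≤ i) (hk : 0 ≤ k) (hik : i ≠ k) :
    PySem.List.pyGetD (PySem.List.pySetD nt i r) k [] = PySem.List.pyGetD nt k [] := by
  rw [PySem.List.pySetD_of_nonneg _ _ hi, PySem.List.pyGetD_of_nonneg _ _ hk,
      PySem.List.pyGetD_of_nonneg _ _ hk]
  simp only [List.getD, List.getElem?_set]
  have : ¬ i.toNat = k.toNat := by omega
  simp [this]

lemma pvGetD_pySetD_self (nt : List (List Int)) (i : Int) (v : List Int)
    (hi : 0 ≤ i) (hv : PySem.List.pyGetD nt i [] = [] → v = []) :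
    PySem.List.pyGetD (PySem.List.pySetD nt i v) i [] = v := by
  rw [PySem.List.pyGetD_of_nonneg _ _ hi] at hv
  rw [PySem.List.pySetD_of_nonneg _ _ hi, PySem.List.pyGetD_of_nonneg _ _ hi]
  by_cases h : i.toNat < nt.length
  · simp [List.getD, List.getElem?_set, h]
  · have hge : nt.length ≤ i.toNat := by omega
    have h0 : nt.getD i.toNat [] = [] := by
      simp [List.getD, List.getElem?_eq_none_iff.mpr hge]
    rw [List.set_eq_of_length_le hge, h0, hv h0]

lemma pvSetD_pySetD_self (nt : List (List Int)) (i : Int) (v w : List Int) (hi : 0 ≤ i) :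
    PySem.List.pySetD (PySem.List.pySetD nt i v) i w = PySem.List.pySetD nt i w := by
  rw [PySem.List.pySetD_of_nonneg _ _ hi, PySem.List.pySetD_of_nonneg _ _ hi,
      PySem.List.pySetD_of_nonneg _ _ hi, List.set_set]

lemma pvSetD_get_self (nt : List (List Int)) (i : Int) (hi : 0 ≤ i) :
    PySem.List.pySetD nt i (PySem.List.pyGetD nt i []) = nt := by
  rw [PySem.List.pySetD_of_nonneg _ _ hi, PySem.List.pyGetD_of_nonneg _ _ hi]
  by_cases h : i.toNat < nt.length
  · apply List.ext_getElem?
    intro k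
    simp [List.getElem?_set, List.getD, List.getElem?_eq_getElem h]
    try (intro hk; omega)
  · rw [List.set_eq_of_length_le (show nt.length ≤ i.toNat by omega)]

lemma pvSetD_empty (a : Int) (v : Int) (ha : 0 ≤ a) :
    PySem.List.pySetD ([] : List Int) a v = [] := by
  rw [PySem.List.pySetD_of_nonneg _ _ ha]; rfl

-- A's inner loop over j in range(a, i) collapses to one row update
lemma pvInnerA (i : Int) (hi : 2 ≤ i) :
    ∀ (a : Int) (nt : List (List Int)), 1 ≤ a →
      (PySem.List.pyRange a i 1).foldl
        (fun nt j =>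
          PySem.List.pySetD nt i
            (PySem.List.pySetD (PySem.List.pyGetD nt i [])
              j
              (PySem.List.pyGetD (PySem.List.pyGetD nt (i-1) []) (j-1) 0 +
               PySem.List.pyGetD (PySem.List.pyGetD nt (i-1) []) j 0)))
        nt
      = PySem.List.pySetD nt i
          (pvFillFrom (PySem.List.pyGetD nt (i-1) []) (PySem.List.pyGetD nt i []) a i) := by
  intro a
  by_cases hle : i ≤ a
  · intro nt _
    rw [PySem.List.pyRange_one_eq_nil hle]
    unfold pvFillFrom
    rw [PySem.List.pyRange_one_eq_nil hle]
    simp [pvSetD_get_self nt i (by omega)]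
  · push_neg at hle
    have hterm : (i - (a+1)).toNat < (i - a).toNat := by omega
    intro nt ha
    rw [PySem.List.pyRange_one_cons hle, List.foldl_cons]
    rw [pvInnerA i hi (a+1) _ (by omega)]
    set v := PySem.List.pyGetD (PySem.List.pyGetD nt (i-1) []) (a-1) 0 +
             PySem.List.pyGetD (PySem.List.pyGetD nt (i-1) []) a 0 with hv
    set r1 := PySem.List.pySetD (PySem.List.pyGetD nt i []) a v with hr1
    rw [pvGetD_pySetD_ne nt i (i-1) r1 (by omega) (by omega) (by omega)]
    rw [pvGetD_pySetD_self nt i r1 (by omega)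
      (by intro h; rw [hr1, h]; exact pvSetD_empty a v (by omega))]
    rw [pvSetD_pySetD_self nt i _ _ (by omega)]
    congr 1
    unfold pvFillFrom
    rw [PySem.List.pyRange_one_cons hle, List.foldl_cons]
termination_by a => (i - a).toNat

-- lengths of the reference tables
lemma pvRowsA_length (tab : List Int) (m : Nat) : (pvRowsA tab m).length = m := by
  induction m with
  | zero => rfl
  | succ k ih => simp [pvRowsA, ih]

lemma pvFinal_length (tab : List Int) (m : Nat) : (pvFinal tab m).length = m := by
  induction m with
  | zero => rfl
  | succ k ih => simp [pvFinal, ih]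

-- A's first loop computes (pvRowsA m, pvTri m, pvTri m)
lemma pvPhase1 (tab : List Int) (m : Nat) :
    (PySem.List.pyRange 1 ((m : Int) + 1) 1).foldl
      (fun (st : List (List Int) × Int × Int) i =>
        let przedzial := PySem.List.slice tab (some st.2.1) (some (st.2.2 + i))
        (st.1 ++ [przedzial], st.2.1 + i, st.2.2 + i)) ([], 0, 0)
    = (pvRowsA tab m, pvTri m, pvTri m) := by
  induction m with
  | zero => rw [PySem.List.pyRange_one_eq_nil (by omega)]; rfl
  | succ k ih =>
    rw [show ((k+1 : Nat) : Int) + 1 = ((k : Int) + 1) + 1 by omega,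
        PySem.List.pyRange_one_succ_right (by omega), List.foldl_append, ih]
    simp only [List.foldl_cons, List.foldl_nil]
    show (pvRowsA tab k ++ [PySem.List.slice tab (some (pvTri k)) (some (pvTri k + ((k:Int)+1)))],
          pvTri k + ((k:Int)+1), pvTri k + ((k:Int)+1))
        = (pvRowsA tab (k+1), pvTri (k+1), pvTri (k+1))
    simp only [pvRowsA, pvTri]
    try push_cast
    try rfl

-- pvUpd on a table extended by an untouched last row acts on the prefix
lemma pvUpd_append (X : List (List Int)) (y : List Int) (i : Int)
    (h0 : 2 ≤ i) (hlt : i < (X.length : Int)) :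
    pvUpd (X ++ [y]) i = pvUpd X i ++ [y] := by
  unfold pvUpd
  have h1 : PySem.List.pyGetD (X ++ [y]) (i-1) [] = PySem.List.pyGetD X (i-1) [] := by
    rw [PySem.List.pyGetD_of_nonneg _ _ (by omega : (0:Int) ≤ i - 1),
        PySem.List.pyGetD_of_nonneg _ _ (by omega : (0:Int) ≤ i - 1)]
    simp only [List.getD]
    rw [List.getElem?_append_left (by omega)]
  have h2 : PySem.List.pyGetD (X ++ [y]) i [] = PySem.List.pyGetD X i [] := by
    rw [PySem.List.pyGetD_of_nonneg _ _ (by omega : (0:Int) ≤ i),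
        PySem.List.pyGetD_of_nonneg _ _ (by omega : (0:Int) ≤ i)]
    simp only [List.getD]
    rw [List.getElem?_append_left (by omega)]
  rw [h1, h2, PySem.List.pySetD_of_nonneg _ _ (by omega : (0:Int) ≤ i),
      PySem.List.pySetD_of_nonneg _ _ (by omega : (0:Int) ≤ i),
      List.set_append]
  simp only [if_pos (show i.toNat < X.length by omega)]

lemma pvUpd_length (nt : List (List Int)) (i : Int) : (pvUpd nt i).length = nt.length := by
  unfold pvUpd; rw [PySem.List.length_pySetD]

-- folding pvUpd over in-prefix indices commutes with appending a last row
lemma pvUpd_foldl_append (is : List Int) (X : List (List Int)) (y : List Int)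
    (h : ∀ i ∈ is, 2 ≤ i ∧ i < (X.length : Int)) :
    is.foldl pvUpd (X ++ [y]) = is.foldl pvUpd X ++ [y] := by
  induction is generalizing X with
  | nil => simp
  | cons i is ih =>
    have hi := h i (by simp)
    simp only [List.foldl_cons]
    rw [pvUpd_append X y i hi.1 hi.2, ih (pvUpd X i)]
    intro k hk
    have := h k (by simp [hk])
    rw [pvUpd_length]
    exact this

-- rewrite A's second loop body to pvUpd on range members
lemma pvOuterA_congr (w : Int) (nt : List (List Int)) :
    (PySem.List.pyRange 2 w 1).foldl
      (fun nt i =>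
        (PySem.List.pyRange 1 i 1).foldl
          (fun nt j =>
            PySem.List.pySetD nt i
              (PySem.List.pySetD (PySem.List.pyGetD nt i [])
                j
                (PySem.List.pyGetD (PySem.List.pyGetD nt (i-1) []) (j-1) 0 +
                 PySem.List.pyGetD (PySem.List.pyGetD nt (i-1) []) j 0)))
          nt)
      nt
    = (PySem.List.pyRange 2 w 1).foldl pvUpd nt := by
  apply PySem.List.foldl_congr_mem
  intro acc i hi
  have h2 : 2 ≤ i := ((PySem.List.mem_pyRange_one).1 hi).1
  exact pvInnerA i h2 1 acc (by omega)

-- A's second loop turns pvRowsA into pvFinal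
lemma pvPhase2 (tab : List Int) (m : Nat) :
    (PySem.List.pyRange 2 (m : Int) 1).foldl pvUpd (pvRowsA tab m) = pvFinal tab m := by
  induction m with
  | zero => rw [PySem.List.pyRange_one_eq_nil (by omega)]; rfl
  | succ k ih =>
    by_cases hk : k < 2
    · interval_cases k
      · rw [PySem.List.pyRange_one_eq_nil (by omega)]
        show pvRowsA tab 1 = pvFinal tab 1
        simp [pvRowsA, pvFinal, pvFillFrom, PySem.List.pyRange_one_eq_nil (by omega : (0:Int) ≤ 1)]
      · rw [PySem.List.pyRange_one_eq_nil (by omega)]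
        show pvRowsA tab 2 = pvFinal tab 2
        simp [pvRowsA, pvFinal, pvFillFrom,
              PySem.List.pyRange_one_eq_nil (by omega : (0:Int) ≤ 1),
              PySem.List.pyRange_one_eq_nil (le_refl (1:Int))]
    · push_neg at hk
      rw [show ((k+1 : Nat) : Int) = (k : Int) + 1 by omega,
          PySem.List.pyRange_one_succ_right (by omega), List.foldl_append]
      have hrows : pvRowsA tab (k+1)
          = pvRowsA tab k ++ [PySem.List.slice tab (some (pvTri k)) (some (pvTri k + ((k:Int)+1)))] := by
        simp only [pvRowsA]; try push_cast
      rw [hrows, pvUpd_foldl_append _ _ _ (by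
        intro i hi
        have := (PySem.List.mem_pyRange_one).1 hi
        rw [pvRowsA_length]
        omega), ih]
      simp only [List.foldl_cons, List.foldl_nil]
      set y := PySem.List.slice tab (some (pvTri k)) (some (pvTri k + ((k:Int)+1))) with hy
      have hlen : (pvFinal tab k).length = k := pvFinal_length tab k
      unfold pvUpd
      have h1 : PySem.List.pyGetD (pvFinal tab k ++ [y]) ((k:Int)-1) []
          = PySem.List.pyGetD (pvFinal tab k) ((k:Int)-1) [] := by
        rw [PySem.List.pyGetD_of_nonneg _ _ (by omega : (0:Int) ≤ (k:Int)-1),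
            PySem.List.pyGetD_of_nonneg _ _ (by omega : (0:Int) ≤ (k:Int)-1)]
        simp only [List.getD]
        rw [List.getElem?_append_left (by omega)]
      have h2 : PySem.List.pyGetD (pvFinal tab k ++ [y]) (k:Int) [] = y := by
        rw [PySem.List.pyGetD_of_nonneg _ _ (by omega : (0:Int) ≤ (k:Int))]
        simp only [List.getD]
        rw [List.getElem?_append_right (by omega)]
        simp [hlen]
      have h3 : PySem.List.pySetD (pvFinal tab k ++ [y]) (k:Int)
            (pvFillFrom (PySem.List.pyGetD (pvFinal tab k) ((k:Int)-1) []) y 1 k)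
          = pvFinal tab k ++ [pvFillFrom (PySem.List.pyGetD (pvFinal tab k) ((k:Int)-1) []) y 1 k] := by
        rw [PySem.List.pySetD_of_nonneg _ _ (by omega : (0:Int) ≤ (k:Int)), List.set_append]
        simp [hlen]
      rw [h1, h2, h3]
      simp only [pvFinal]
      push_cast
      try rfl

-- ===== B-side lemmas =====

lemma pvTri_cast (m : Nat) : pvTri m = ((pvTriN m : Nat) : Int) := by
  induction m with
  | zero => rfl
  | succ k ih =>
    show pvTri k + ((k:Int) + 1) = ((pvTriN k + (k+1) : Nat) : Int)
    rw [ih]; push_cast; ring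

lemma pvTriN_two_mul (m : Nat) : 2 * pvTriN m = m * (m + 1) := by
  induction m with
  | zero => rfl
  | succ k ih =>
    show 2 * (pvTriN k + (k+1)) = (k+1) * (k+2)
    rw [Nat.mul_add, ih]; ring

lemma pvTriN_add_mono {i j : Nat} (h : i ≤ j) : pvTriN i + i ≤ pvTriN j + j := by
  induction j with
  | zero =>
    have : i = 0 := by omega
    subst this; exact le_refl _
  | succ k ih =>
    have hdef : pvTriN (k+1) = pvTriN k + (k+1) := rfl
    rcases Nat.lt_or_ge i (k+1) with hlt | hge
    · have := ih (by omega)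
      omega
    · have : i = k + 1 := by omega
      subst this; exact le_refl _

-- the closed-form offset in B equals pvTri
lemma pvLo_eq (m : Nat) :
    PySem.Int.floordiv ((m : Int) * ((m : Int) + 1)) 2 = pvTri m := by
  have h1 : (m : Int) * ((m : Int) + 1) = ((m * (m + 1) : Nat) : Int) := by push_cast; ring
  rw [h1, pvTri_cast]
  have := pvTriN_two_mul m
  rw [show ((2:Int)) = ((2:Nat):Int) from rfl, PySem.Int.floordiv_natCast]
  congr 1
  omega

lemma pvFill_length (prev seg : List Int) (a i : Int) :
    (pvFillFrom prev seg a i).length = seg.length := by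
  unfold pvFillFrom
  generalize PySem.List.pyRange a i 1 = l
  induction l generalizing seg with
  | nil => rfl
  | cons x xs ih =>
    simp only [List.foldl_cons]
    rw [ih, PySem.List.length_pySetD]

-- pointwise characterisation of the interior fill
lemma pvFill_get (prev seg : List Int) (m : Nat) (hm : m ≤ seg.length) :
    ∀ (a : Int) (k : Nat), 1 ≤ a →
    (pvFillFrom prev seg a (m : Int))[k]? =
      if a ≤ (k : Int) ∧ k < m then
        some (PySem.List.pyGetD prev ((k : Int) - 1) 0 + PySem.List.pyGetD prev (k : Int) 0)
      else seg[k]? := by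
  intro a
  by_cases hle : (m : Int) ≤ a
  · intro k ha
    unfold pvFillFrom
    rw [PySem.List.pyRange_one_eq_nil hle]
    have : ¬ (a ≤ (k:Int) ∧ k < m) := by omega
    simp [this]
  · push_neg at hle
    have hterm : ((m:Int) - (a+1)).toNat < ((m:Int) - a).toNat := by omega
    intro k ha
    have hstep : pvFillFrom prev seg a (m : Int)
        = pvFillFrom prev
            (PySem.List.pySetD seg a
              (PySem.List.pyGetD prev (a-1) 0 + PySem.List.pyGetD prev a 0)) (a+1) (m : Int) := by
      unfold pvFillFrom
      rw [PySem.List.pyRange_one_cons hle, List.foldl_cons]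
    rw [hstep, pvFill_get prev _ m (by rw [PySem.List.length_pySetD]; exact hm) (a+1) k (by omega)]
    rw [PySem.List.pySetD_of_nonneg _ _ (by omega : (0:Int) ≤ a)]
    by_cases h1 : a + 1 ≤ (k:Int) ∧ k < m
    · rw [if_pos h1, if_pos ⟨by omega, h1.2⟩]
    · rw [if_neg h1]
      by_cases h2 : a ≤ (k:Int) ∧ k < m
      · -- here k = a.toNat
        have hk : (k : Int) = a := by omega
        have hka : k = a.toNat := by omega
        rw [if_pos h2, List.getElem?_set, if_pos (by omega), if_pos (by omega), hk]
      · rw [if_neg h2, List.getElem?_set]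
        have : ¬ a.toNat = k := by omega
        simp [this]
termination_by a => ((m:Int) - a).toNat

lemma pvZip_getElem? (prev : List Int) (j : Nat) (hj : j + 1 < prev.length) :
    (List.zipWith (· + ·) prev (prev.drop 1))[j]? = some (prev[j] + prev[j+1]) := by
  rw [List.getElem?_zipWith]
  rw [List.getElem?_eq_getElem (by omega), List.getElem?_drop, List.getElem?_eq_getElem (by omega)]
  simp [Nat.add_comm 1 j]

-- the interior fill IS edge ++ zip-of-adjacent-pairs ++ edge
lemma pvFill_eq_zip (prev seg : List Int) (m : Nat)
    (hm : m ≤ seg.length) (hprev : prev.length = m) (h2 : 1 ≤ m) :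
    pvFillFrom prev seg 1 (m : Int)
      = seg.take 1 ++ List.zipWith (· + ·) prev (prev.drop 1) ++ seg.drop m := by
  apply List.ext_getElem?
  intro k
  rw [pvFill_get prev seg m hm 1 k (by omega)]
  have hzlen : (List.zipWith (· + ·) prev (prev.drop 1)).length = m - 1 := by
    simp [hprev]
  have htlen : (seg.take 1).length = 1 := by simp; omega
  by_cases hk0 : k = 0
  · subst hk0
    have : ¬ ((1:Int) ≤ ((0:Nat):Int) ∧ 0 < m) := by omega
    rw [if_neg this, List.getElem?_append_left (by simp [htlen]),
        List.getElem?_append_left (by omega), List.getElem?_take]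
    simp
  · by_cases hkm : k < m
    · rw [if_pos ⟨by omega, hkm⟩]
      rw [List.getElem?_append_left (by rw [List.length_append, htlen, hzlen]; omega),
          List.getElem?_append_right (by omega), htlen]
      rw [pvZip_getElem? prev (k-1) (by omega)]
      congr 1
      rw [PySem.List.pyGetD_of_nonneg _ _ (by omega : (0:Int) ≤ (k:Int)-1),
          PySem.List.pyGetD_of_nonneg _ _ (by omega : (0:Int) ≤ (k:Int))]
      have e1 : ((k:Int)-1).toNat = k - 1 := by omega
      have e2 : ((k:Int)).toNat = k := by omega
      rw [e1, e2]
      have h1 : k - 1 < prev.length := by omega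
      have h2' : k < prev.length := by omega
      have e3 : k - 1 + 1 = k := by omega
      simp [List.getD, List.getElem?_eq_getElem h1, List.getElem?_eq_getElem h2', e3]
    · have : ¬ ((1:Int) ≤ (k:Int) ∧ k < m) := by omega
      rw [if_neg this,
          List.getElem?_append_right (by rw [List.length_append, htlen, hzlen]; omega),
          List.getElem?_drop, List.length_append, htlen, hzlen]
      congr 1
      omega

-- B's loop computes pvFinal m, given that tab is long enough for every filled row
lemma pvPhaseB (tab : List Int) (m : Nat)
    (H : ∀ i : Nat, 2 ≤ i → i < m → pvTriN i + i ≤ tab.length) :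
    (PySem.List.pyRange 0 (m : Int) 1).foldl
      (fun (newTab : List (List Int)) i =>
        let lo := PySem.Int.floordiv (i * (i + 1)) 2
        let row :=
          if i < 2 then
            PySem.List.slice tab (some lo) (some (lo + i + 1))
          else
            let prev := PySem.List.pyGetD newTab (-1) []
            PySem.List.slice tab (some lo) (some (lo + 1)) ++
              List.zipWith (· + ·) prev (PySem.List.slice prev (some 1) none) ++
              PySem.List.slice tab (some (lo + i)) (some (lo + i + 1))
        newTab ++ [row]) []
    = pvFinal tab m := by
  induction m with
  | zero => rw [PySem.List.pyRange_one_eq_nil (by omega)]; rfl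
  | succ k ih =>
    rw [show ((k+1 : Nat) : Int) = (k : Int) + 1 by omega,
        PySem.List.pyRange_one_succ_right (by omega), List.foldl_append,
        ih (fun i h2 hik => H i h2 (by omega))]
    simp only [List.foldl_cons, List.foldl_nil]
    rw [pvLo_eq k]
    by_cases hk2 : (k : Int) < 2
    · rw [if_pos hk2]
      have hfill : pvFillFrom (PySem.List.pyGetD (pvFinal tab k) ((k:Int)-1) [])
            (PySem.List.slice tab (some (pvTri k)) (some (pvTri k + ((k:Int) + 1)))) 1 k
          = PySem.List.slice tab (some (pvTri k)) (some (pvTri k + ((k:Int) + 1))) := by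
        unfold pvFillFrom
        rw [PySem.List.pyRange_one_eq_nil (show (k:Int) ≤ 1 by omega)]
        rfl
      show pvFinal tab k ++ [PySem.List.slice tab (some (pvTri k)) (some (pvTri k + (k:Int) + 1))]
          = pvFinal tab (k+1)
      simp only [pvFinal]
      rw [hfill]
      simp [add_assoc]
    · rw [if_neg hk2]
      push_neg at hk2
      -- k ≥ 2 : the previous row is full and the new slice is long enough
      obtain ⟨j, rfl⟩ : ∃ j, k = j + 1 := ⟨k - 1, by omega⟩
      have hH : pvTriN (j+1) + (j+1) ≤ tab.length := H (j+1) (by omega) (by omega)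
      -- previous row of pvFinal
      set prevRow := pvFillFrom (PySem.List.pyGetD (pvFinal tab j) ((j : Int) - 1) [])
          (PySem.List.slice tab (some (pvTri j)) (some (pvTri j + (j + 1)))) 1 j with hprevRow
      have hfin : pvFinal tab (j+1) = pvFinal tab j ++ [prevRow] := by
        simp only [pvFinal]
        rw [hprevRow]
      have hprevget : PySem.List.pyGetD (pvFinal tab (j+1)) (-1) [] = prevRow := by
        rw [hfin, PySem.List.pyGetD_neg_one_append_singleton]
      -- lengths
      have hslice : ∀ (a n : Nat), PySem.List.slice tab (some ((a:Nat):Int)) (some (((a:Nat):Int) + (n:Nat))) = (tab.drop a).take n :=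
        fun a n => PySem.List.slice_natCast_add tab a n
      have hprevlen : prevRow.length = j + 1 := by
        rw [hprevRow, pvFill_length, pvTri_cast]
        rw [show (((pvTriN j : Nat)) : Int) + ((j:Int) + 1) = (((pvTriN j):Nat):Int) + (((j+1 : Nat)):Int) by push_cast; ring]
        rw [PySem.List.slice_natCast_add tab (pvTriN j) (j+1)]
        have : pvTriN j + (j+1) + (j+1) ≤ tab.length := by
          have : pvTriN (j+1) = pvTriN j + (j+1) := rfl
          omega
        simp
        omega
      -- the new row's slice
      set seg := PySem.List.slice tab (some (pvTri (j+1))) (some (pvTri (j+1) + ((j:Int) + 1 + 1))) with hseg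
      have hsegeq : seg = (tab.drop (pvTriN (j+1))).take (j+2) := by
        rw [hseg, pvTri_cast]
        rw [show (((pvTriN (j+1) : Nat)) : Int) + ((j:Int) + 1 + 1) = (((pvTriN (j+1)):Nat):Int) + (((j+2 : Nat)):Int) by push_cast; ring]
        exact PySem.List.slice_natCast_add tab (pvTriN (j+1)) (j+2)
      have hseglen : j + 1 ≤ seg.length := by
        rw [hsegeq]; simp; omega
      -- edge slices are take/drop of seg
      have hleft : PySem.List.slice tab (some (pvTri (j+1))) (some (pvTri (j+1) + 1)) = seg.take 1 := by
        rw [pvTri_cast,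
            show (((pvTriN (j+1) : Nat)) : Int) + 1 = (((pvTriN (j+1)):Nat):Int) + (((1 : Nat)):Int) by push_cast; ring,
            PySem.List.slice_natCast_add tab (pvTriN (j+1)) 1, hsegeq, List.take_take,
            Nat.min_eq_left (by omega)]
      have hright : PySem.List.slice tab (some (pvTri (j+1) + ((j:Int)+1))) (some (pvTri (j+1) + ((j:Int)+1) + 1)) = seg.drop (j+1) := by
        rw [pvTri_cast,
            show (((pvTriN (j+1) : Nat)) : Int) + ((j:Int)+1) = (((pvTriN (j+1) + (j+1) : Nat)) : Int) by push_cast; ring]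
        rw [show ((((pvTriN (j+1) + (j+1) : Nat)) : Int)) + 1 = (((pvTriN (j+1) + (j+1) : Nat)):Int) + (((1:Nat)):Int) by push_cast; ring]
        rw [PySem.List.slice_natCast_add tab (pvTriN (j+1) + (j+1)) 1, hsegeq,
            List.drop_take, List.drop_drop]
        congr 1 <;> omega
      -- assemble
      rw [hprevget, PySem.List.slice_from_one]
      have hzipfill : pvFillFrom prevRow seg 1 ((j+1 : Nat) : Int)
          = seg.take 1 ++ List.zipWith (· + ·) prevRow (prevRow.drop 1) ++ seg.drop (j+1) :=
        pvFill_eq_zip prevRow seg (j+1) hseglen hprevlen (by omega)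
      have htail : prevRow.tail = prevRow.drop 1 := by rw [List.drop_one]
      show pvFinal tab (j+1) ++
          [PySem.List.slice tab (some (pvTri (j+1))) (some (pvTri (j+1) + 1)) ++
            List.zipWith (· + ·) prevRow prevRow.tail ++
            PySem.List.slice tab (some (pvTri (j+1) + ((j:Int)+1))) (some (pvTri (j+1) + ((j:Int)+1) + 1))]
        = pvFinal tab (j+1+1)
      rw [hleft, hright, htail, ← hzipfill]
      have hprevget2 : PySem.List.pyGetD (pvFinal tab (j+1)) (((j+1 : Nat):Int) - 1) [] = prevRow := by
        have e : ((((j+1 : Nat)):Int) - 1).toNat = j := by omega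
        rw [hfin, PySem.List.pyGetD_of_nonneg _ _ (by omega : (0:Int) ≤ (((j+1 : Nat)):Int) - 1)]
        simp only [List.getD, e]
        rw [List.getElem?_append_right (by simp [pvFinal_length])]
        simp [pvFinal_length]
      have hrhs : pvFinal tab (j+1+1)
          = pvFinal tab (j+1) ++
            [pvFillFrom (PySem.List.pyGetD (pvFinal tab (j+1)) (((j+1 : Nat):Int) - 1) [])
              (PySem.List.slice tab (some (pvTri (j+1))) (some (pvTri (j+1) + ((((j+1 : Nat)):Int) + 1)))) 1 ((j+1 : Nat):Int)] := rfl
      rw [hrhs, hprevget2,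
          show (pvTri (j+1) + ((((j+1 : Nat)):Int) + 1)) = pvTri (j+1) + ((j:Int) + 1 + 1) by push_cast; ring,
          ← hseg]

-- ===== VERDICT (by name: the statement is the Claim_ definition above) =====
theorem stworzTablicePascala_spec : Claim_equal_stworzTablicePascala := by
  intro tab w _ hpre
  unfold Spec_stworzTablicePascala stworzTablicePascala stworzTablicePascala_alt
  by_cases hw : w ≤ 0
  · rw [PySem.List.pyRange_one_eq_nil (by omega : w + 1 ≤ 1),
        PySem.List.pyRange_one_eq_nil (by omega : w ≤ 2),
        PySem.List.pyRange_one_eq_nil (by omega : w ≤ 0)]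
    rfl
  · have hm : w = (w.toNat : Int) := by omega
    rw [hm]
    simp only []
    rw [pvPhase1 tab w.toNat]
    have H : ∀ i : Nat, 2 ≤ i → i < w.toNat → pvTriN i + i ≤ tab.length := by
      intro i h2 hi
      have hw3 : 3 ≤ w := by omega
      have hlen : 2 * (tab.length : Int) ≥ (w - 1) * (w + 2) := by
        rcases hpre with h | h
        · omega
        · exact h
      have hmono := pvTriN_add_mono (show i ≤ w.toNat - 1 by omega)
      have htw : 2 * (pvTriN (w.toNat - 1) + (w.toNat - 1)) = (w.toNat - 1) * (w.toNat + 2) := by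
        have := pvTriN_two_mul (w.toNat - 1)
        have hsub : w.toNat - 1 + 1 = w.toNat := by omega
        rw [Nat.mul_add, this, hsub]
        ring_nf
      have hcast : ((w.toNat - 1) * (w.toNat + 2) : Nat) = ((w - 1) * (w + 2) : Int).toNat := by
        have h1 : ((w.toNat - 1 : Nat) : Int) = w - 1 := by omega
        have h2 : ((w.toNat + 2 : Nat) : Int) = w + 2 := by omega
        have : (((w.toNat - 1) * (w.toNat + 2) : Nat) : Int) = (w - 1) * (w + 2) := by
          push_cast [h1, h2]; ring
        omega
      omega
    rw [pvPhaseB tab w.toNat H]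
    rw [pvOuterA_congr]
    exact pvPhase2 tab w.toNat
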